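-- pv_equiv track=rewrite | github.com/barszu/WDI | wdi 2/zad14.py | zad14
-- ===== SOURCE A (Python) =====
-- def mask_gen(lenth):
--
--     def bins(num , lenth ):
--         #returns binary representation with 0 in front of to fullfill
--         bins = ""
--         while num != 0:
--             bins += str( num%2 )
--             num = num//2
--
--         bins = bins[::-1]
--         while len(bins) < lenth :
--             bins = "0" + bins
--         return bins
--
--     mask_list = [bins(i , lenth) for i in range(2**(lenth))]
--     return mask_list
--
-- def is_prime(num):
--     if num%2 == 0 or num%3 == 0 :
--         return False
--     from math import isqrt
--     #dla duzych liczb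
--     if num > 100:
--         k = 1
--         while (6*k - 1 < isqrt(num) + 1):
--             if num%(6*k - 1) == 0 or num%(6*k + 1) == 0 :
--                 return False
--             k += 1
--         else: return True
--     #dla mniejszych liczb
--     else:
--         for d in range(2 , isqrt(num) + 1):
--             if num%d == 0 : return False
--         else: return True
--
-- def zad14(a , b):
--     a , b = str(a) , str(b)
--     c = 0
--     l_a = len(a)
--     l_b = len(b)
--     l = l_a + l_b
--     # 0 - cyfra z liczby a
--     # 1 - cyfra z liczby b
--     maski = mask_gen(l)
--
--     for mask in maski:
--         if mask.count("0") == l_a and mask.count("1") == l_b :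
--             num = ""
--             id_a = 0
--             id_b = 0
--             for i in range(l):
--                 if mask[i] == "0" :
--                     num += a[id_a]
--                     id_a += 1
--                 elif mask[i] == "1" :
--                     num += b[id_b]
--                     id_b += 1
--             if is_prime(int(num)) : c += 1
--     return c
-- ===== SOURCE B (Python) =====
-- def is_prime(num):
--     # the module's primality helper, reused unchanged
--     if num % 2 == 0 or num % 3 == 0:
--         return False
--     from math import isqrt
--     if num > 100:
--         k = 1
--         while (6 * k - 1 < isqrt(num) + 1):
--             if num % (6 * k - 1) == 0 or num % (6 * k + 1) == 0:
--                 return False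
--             k += 1
--         else:
--             return True
--     else:
--         for d in range(2, isqrt(num) + 1):
--             if num % d == 0:
--                 return False
--         else:
--             return True
--
--
-- def zad14(a, b):
--     a, b = str(a), str(b)
--     la, lb = len(a), len(b)
--
--     def go(i, j, prefix):
--         # enumerate only the valid interleavings directly
--         if i == la and j == lb:
--             return 1 if is_prime(int(prefix)) else 0
--         c = 0
--         if i < la:
--             c += go(i + 1, j, prefix + a[i])
--         if j < lb:
--             c += go(i, j + 1, prefix + b[j])
--         return c
--
--     return go(0, 0, "")
-- ===== Notes on version B (the rewrite author's own statement) =====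
-- stated objective: faster
-- what changed: A enumerates all 2^(len a + len b) bit masks and filters by digit counts; B recurses over the two digit positions, generating each valid interleaving exactly once (the module's is_prime helper is reused unchanged).
import Mathlib
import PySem

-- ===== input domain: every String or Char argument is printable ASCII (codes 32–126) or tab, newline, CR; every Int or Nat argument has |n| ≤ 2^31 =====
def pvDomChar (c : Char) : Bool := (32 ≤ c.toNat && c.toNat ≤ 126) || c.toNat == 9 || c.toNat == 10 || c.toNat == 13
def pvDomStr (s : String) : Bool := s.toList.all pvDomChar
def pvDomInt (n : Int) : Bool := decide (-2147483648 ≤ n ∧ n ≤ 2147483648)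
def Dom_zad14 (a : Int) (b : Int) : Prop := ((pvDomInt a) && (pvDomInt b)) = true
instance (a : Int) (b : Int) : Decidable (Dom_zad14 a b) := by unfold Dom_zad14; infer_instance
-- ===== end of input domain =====

-- B replaces A's enumeration of all 2^(len a + len b) bit masks (filtered by digit counts) with a
-- direct recursion over valid interleavings only; the module's is_prime helper is reused unchanged
-- by both implementations.

-- ===== PORT A =====

-- bins' inner while loop: bins += str(num % 2); num = num // 2  (num is a range value, hence a Nat;
-- Python's // on nonnegative operands is Nat division)
def pvBinsLoop (num : Nat) (acc : List Char) : List Char :=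
  if num ≠ 0 then pvBinsLoop (num / 2) (acc ++ PySem.Int.toChars ((num % 2 : Nat) : Int)) else acc
termination_by num
decreasing_by exact Nat.div_lt_self (Nat.pos_of_ne_zero (by assumption)) Nat.one_lt_two

-- while len(bins) < lenth: bins = "0" + bins
def pvPadLoop (lenth : Nat) (s : List Char) : List Char :=
  if s.length < lenth then pvPadLoop lenth ('0' :: s) else s
termination_by lenth - s.length
decreasing_by exact Nat.sub_succ_lt_self lenth s.length (by assumption)

def pvBins (num : Nat) (lenth : Nat) : List Char :=
  pvPadLoop lenth (pvBinsLoop num []).reverse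

-- mask_gen: [bins(i, lenth) for i in range(2**lenth)]  (lenth = a digit count sum, a Nat)
def pvMaskGen (lenth : Nat) : List (List Char) :=
  (List.range (2 ^ lenth)).map (fun i => pvBins i lenth)

-- is_prime's 6k±1 while loop (num > 100); s = isqrt(num)
def pvSixKLoop (num : Int) (s : Int) (k : Int) : Bool :=
  if 6 * k - 1 < s + 1 then
    (if num % (6 * k - 1) == 0 || num % (6 * k + 1) == 0 then false
     else pvSixKLoop num s (k + 1))
  else true
termination_by (s + 2 - 6 * k).toNat
decreasing_by
  rename_i h _
  have h6 : (0 : Int) < 6 := by decide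
  have hlt : 6 * k < 6 * (k + 1) :=
    calc (6 : Int) * k < 6 * k + 6 := lt_add_of_pos_right _ h6
    _ = 6 * (k + 1) := by rw [mul_add, mul_one]
  have h1 : s + 2 - 6 * (k + 1) < s + 2 - 6 * k := sub_lt_sub_left hlt _
  have h2 : (0 : Int) < s + 2 - 6 * k := sub_pos.mpr (by
    calc (6 : Int) * k = 6 * k - 1 + 1 := by rw [sub_add_cancel]
    _ < s + 1 + 1 := add_lt_add_of_lt_of_le h le_rfl
    _ = s + 2 := by rw [add_assoc]; norm_num)
  exact (Int.toNat_lt_toNat h2).mpr h1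

-- is_prime's trial-division for-loop with early return False
def pvTrialLoop (num : Int) (ds : List Int) : Bool :=
  match ds with
  | [] => true
  | d :: rest => if num % d == 0 then false else pvTrialLoop num rest

-- is_prime(num); math.isqrt(num) ported as Nat.sqrt num.toNat — exact for num ≥ 0 (Python raises
-- ValueError for negative num, excluded by Pre_); % with a positive divisor is Lean's Int.emod = Python's %
def pvIsPrime (num : Int) : Bool :=
  if num % 2 == 0 || num % 3 == 0 then false
  else if num > 100 then pvSixKLoop num ((Nat.sqrt num.toNat : Nat) : Int) 1
  else pvTrialLoop num (PySem.List.pyRange 2 (((Nat.sqrt num.toNat : Nat) : Int) + 1) 1)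

-- int(num): the built digit string; under Pre_ it is all digits, so ofChars? is always some (none = the
-- ValueError Pre_ excludes)
def pvToInt (s : List Char) : Int := (PySem.Int.ofChars? s).getD 0

-- the inner 'for i in range(l)' building num from mask; state = (num, id_a, id_b); a[id_a] is in range
-- whenever the count filter holds, so getD's default is never read there
def pvBuild (sa sb : List Char) (mask : List Char) : List Char :=
  (mask.foldl (fun (st : List Char × Nat × Nat) ch =>
      if ch = '0' then (st.1 ++ [sa.getD st.2.1 ' '], st.2.1 + 1, st.2.2)
      else if ch = '1' then (st.1 ++ [sb.getD st.2.2 ' '], st.2.1, st.2.2 + 1)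
      else st) ([], 0, 0)).1

-- mask.count("0") for the one-char needle is the character count (Python str.count of a length-1 substring)
def zad14 (a : Int) (b : Int) : Int :=
  let sa := PySem.Int.toChars a
  let sb := PySem.Int.toChars b
  let la := sa.length
  let lb := sb.length
  (pvMaskGen (la + lb)).foldl (fun c mask =>
    if mask.count '0' = la ∧ mask.count '1' = lb then
      (if pvIsPrime (pvToInt (pvBuild sa sb mask)) then c + 1 else c)
    else c) 0

-- ===== PORT B =====

-- go(i, j, prefix) of Source B: recursion over the two string positions, building each valid interleaving once
def pvGo (sa sb : List Char) (i j : Nat) (pre : List Char) : Int :=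
  if i = sa.length ∧ j = sb.length then (if pvIsPrime (pvToInt pre) then 1 else 0)
  else
    (if i < sa.length then pvGo sa sb (i + 1) j (pre ++ [sa.getD i ' ']) else 0)
    + (if j < sb.length then pvGo sa sb i (j + 1) (pre ++ [sb.getD j ' ']) else 0)
termination_by (sa.length - i) + (sb.length - j)
decreasing_by
  · exact Nat.add_lt_add_right (Nat.sub_succ_lt_self sa.length i (by assumption)) _
  · exact Nat.add_lt_add_left (Nat.sub_succ_lt_self sb.length j (by assumption)) _

def zad14_alt (a : Int) (b : Int) : Int :=
  let sa := PySem.Int.toChars a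
  let sb := PySem.Int.toChars b
  pvGo sa sb 0 0 []

-- ===== PRECONDITION & SPEC =====
-- A raises for negative a or b (is_prime calls math.isqrt on a negative interleaving, or int() sees a
-- '-' in mid-string: ValueError); B raises there too. Excluded; A returns on all nonnegative inputs.
def Pre_zad14 (a : Int) (b : Int) : Prop := 0 ≤ a ∧ 0 ≤ b
instance (a : Int) (b : Int) : Decidable (Pre_zad14 a b) := by unfold Pre_zad14; infer_instance
def pvWitness_zad14 : Int × Int := (2, 3)

def Spec_zad14 (a : Int) (b : Int) (out : Int) : Prop := out = zad14_alt a b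
instance (a : Int) (b : Int) (out : Int) : Decidable (Spec_zad14 a b out) := by unfold Spec_zad14; infer_instance

-- ===== CLAIM (what is proved, stated in full; the proofs are below) =====
def Claim_equal_zad14 : Prop := ∀ (a : Int) (b : Int), Dom_zad14 a b → Pre_zad14 a b → Spec_zad14 a b (zad14 a b)

-- ===== LEMMAS AND PROOFS =====

-- all binary strings of length l, most significant position first, in numeric order
def pvAllBin : Nat → List (List Char)
  | 0 => [[]]
  | l + 1 => (pvAllBin l).map (fun m => '0' :: m) ++ (pvAllBin l).map (fun m => '1' :: m)

-- least-significant-first binary digits of n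
def pvRevBin (n : Nat) : List Char :=
  if n = 0 then [] else (if n % 2 = 1 then '1' else '0') :: pvRevBin (n / 2)
termination_by n
decreasing_by exact Nat.div_lt_self (Nat.pos_of_ne_zero (by assumption)) Nat.one_lt_two

-- consuming form of pvBuild's fold
def pvMerge : List Char → List Char → List Char → List Char
  | [], _, _ => []
  | c :: ms, xs, ys =>
    if c = '0' then xs.getD 0 ' ' :: pvMerge ms xs.tail ys
    else if c = '1' then ys.getD 0 ' ' :: pvMerge ms xs ys.tail
    else pvMerge ms xs ys

-- consuming form of pvGo
def pvGoC (xs ys pre : List Char) : Int :=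
  if xs = [] ∧ ys = [] then (if pvIsPrime (pvToInt pre) then 1 else 0)
  else
    (if _h : xs ≠ [] then pvGoC xs.tail ys (pre ++ [xs.getD 0 ' ']) else 0)
    + (if _h : ys ≠ [] then pvGoC xs ys.tail (pre ++ [ys.getD 0 ' ']) else 0)
termination_by xs.length + ys.length
decreasing_by
  · exact Nat.add_lt_add_right
      (List.length_tail .. ▸ Nat.sub_lt (List.length_pos_iff.mpr (by assumption)) Nat.one_pos) _
  · exact Nat.add_lt_add_left
      (List.length_tail .. ▸ Nat.sub_lt (List.length_pos_iff.mpr (by assumption)) Nat.one_pos) _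

lemma pvBinsLoop_eq (n : Nat) : ∀ acc, pvBinsLoop n acc = acc ++ pvRevBin n := by
  induction n using Nat.strong_induction_on with
  | _ n ih =>
    intro acc
    rw [pvBinsLoop, pvRevBin]
    by_cases h : n = 0
    · simp [h]
    · have h2 : n / 2 < n := Nat.div_lt_self (Nat.pos_of_ne_zero h) (by omega)
      rcases Nat.mod_two_eq_zero_or_one n with hm | hm <;>
        simp [h, hm, ih _ h2, PySem.Int.toChars, Nat.toDigits, Nat.toDigitsCore, Nat.digitChar]

lemma pvPadLoop_eq (k : Nat) (s : List Char) : pvPadLoop k s = List.replicate (k - s.length) '0' ++ s := by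
  by_cases h : s.length < k
  · have : k - ('0' :: s).length < k - s.length := by simp; omega
    rw [pvPadLoop, if_pos h, pvPadLoop_eq k ('0' :: s)]
    have hk : k - s.length = (k - ('0' :: s).length) + 1 := by simp; omega
    rw [hk, List.replicate_succ']
    simp
  · rw [pvPadLoop, if_neg h]
    have : k - s.length = 0 := by omega
    simp [this]
termination_by k - s.length

lemma pvRevBin_len {n l : Nat} (h : n < 2 ^ l) : (pvRevBin n).length ≤ l := by
  induction l generalizing n with
  | zero =>
    interval_cases n
    simp [pvRevBin]
  | succ l ih =>
    rw [pvRevBin]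
    by_cases h0 : n = 0
    · simp [h0]
    · have : n / 2 < 2 ^ l := by omega
      simp only [h0, if_false, List.length_cons]
      have := ih this
      omega

lemma pvBins_eq (n l : Nat) : pvBins n l = List.replicate (l - (pvRevBin n).length) '0' ++ (pvRevBin n).reverse := by
  rw [pvBins, pvBinsLoop_eq, pvPadLoop_eq]
  simp

lemma pvBins_len {n l : Nat} (h : n < 2 ^ l) : (pvBins n l).length = l := by
  have := pvRevBin_len h
  rw [pvBins_eq]
  simp
  omega

lemma pvBins_succ_lo {n l : Nat} (h : n < 2 ^ l) : pvBins n (l + 1) = '0' :: pvBins n l := by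
  have := pvRevBin_len h
  rw [pvBins_eq, pvBins_eq]
  have h1 : l + 1 - (pvRevBin n).length = (l - (pvRevBin n).length) + 1 := by omega
  rw [h1, List.replicate_succ]
  simp

lemma pvBins_step (n l : Nat) :
    pvBins n (l + 1) = pvBins (n / 2) l ++ [if n % 2 = 1 then '1' else '0'] := by
  rw [pvBins_eq, pvBins_eq]
  by_cases h0 : n = 0
  · subst h0
    simp [pvRevBin, List.replicate_succ']
  · conv_lhs => rw [pvRevBin]
    simp only [h0, if_false]
    simp [List.append_assoc]

lemma pvRevBin_hi {l n : Nat} (h : n < 2 ^ l) : (pvRevBin (2 ^ l + n)).reverse = '1' :: pvBins n l := by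
  induction l generalizing n with
  | zero =>
    interval_cases n
    rw [pvRevBin, pvBins, pvBinsLoop, pvPadLoop]
    simp [pvRevBin]
  | succ l ih =>
    have hm : (2 ^ (l + 1) + n) % 2 = n % 2 := by
      have : 2 ^ (l + 1) % 2 = 0 := by
        simp [Nat.pow_succ]
      omega
    have hd : (2 ^ (l + 1) + n) / 2 = 2 ^ l + n / 2 := by
      rw [Nat.pow_succ]
      omega
    have hlt : n / 2 < 2 ^ l := by
      rw [Nat.pow_succ] at h
      omega
    conv_lhs => rw [pvRevBin]
    simp only [show 2 ^ (l + 1) + n ≠ 0 by positivity, if_false, hm, hd]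
    rw [List.reverse_cons, ih hlt, pvBins_step n l]
    simp

lemma pvBins_succ_hi {n l : Nat} (h : n < 2 ^ l) : pvBins (2 ^ l + n) (l + 1) = '1' :: pvBins n l := by
  rw [pvBins, pvBinsLoop_eq]
  simp only [List.nil_append]
  rw [pvRevBin_hi h, pvPadLoop_eq]
  have : ('1' :: pvBins n l).length = l + 1 := by simp [pvBins_len h]
  rw [this]
  simp

lemma pvMaskGen_eq (l : Nat) : pvMaskGen l = pvAllBin l := by
  induction l with
  | zero =>
    rw [pvMaskGen, pvAllBin]
    rw [pow_zero, List.range_one, List.map_singleton, pvBins, pvBinsLoop, pvPadLoop]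
    simp
  | succ l ih =>
    rw [pvMaskGen, pvAllBin, ← ih, pvMaskGen]
    rw [show 2 ^ (l + 1) = 2 ^ l + 2 ^ l by ring, List.range_add]
    rw [List.map_append, List.map_map, List.map_map]
    congr 1
    · rw [List.map_congr_left (fun i hi => pvBins_succ_lo (List.mem_range.mp hi))]
      rfl
    · rw [List.map_map]
      exact List.map_congr_left (fun i hi => pvBins_succ_hi (List.mem_range.mp hi))

lemma pvBuild_fold_eq (sa sb : List Char) (mask : List Char) :
    ∀ (p : List Char) (ia ib : Nat),
      (mask.foldl (fun (st : List Char × Nat × Nat) ch =>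
        if ch = '0' then (st.1 ++ [sa.getD st.2.1 ' '], st.2.1 + 1, st.2.2)
        else if ch = '1' then (st.1 ++ [sb.getD st.2.2 ' '], st.2.1, st.2.2 + 1)
        else st) (p, ia, ib)).1 = p ++ pvMerge mask (sa.drop ia) (sb.drop ib) := by
  induction mask with
  | nil => simp [pvMerge]
  | cons ch ms ih =>
    by_cases h0 : ch = '0'
    · simp only [List.foldl_cons, h0, ih]
      simp [pvMerge, List.tail_drop, List.getD, List.getElem?_drop]
    · by_cases h1 : ch = '1'
      · simp only [List.foldl_cons, h1, ih]
        simp [pvMerge, List.tail_drop, List.getD, List.getElem?_drop]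
      · simp only [List.foldl_cons, h0, h1, if_false, ih]
        simp [pvMerge, h0, h1]

lemma pvGo_eq_goC (sa sb : List Char) : ∀ (i j : Nat) (pre : List Char), i ≤ sa.length → j ≤ sb.length →
    pvGo sa sb i j pre = pvGoC (sa.drop i) (sb.drop j) pre := by
  intro i j pre hi hj
  have hxs : sa.drop i = [] ↔ i = sa.length := by rw [List.drop_eq_nil_iff]; omega
  have hys : sb.drop j = [] ↔ j = sb.length := by rw [List.drop_eq_nil_iff]; omega
  rw [pvGo, pvGoC]
  simp only [hxs, hys, ne_eq]
  by_cases hb : i = sa.length ∧ j = sb.length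
  · rw [if_pos hb, if_pos hb]
  · rw [if_neg hb, if_neg hb]
    congr 1
    · by_cases hlt : i < sa.length
      · rw [dif_pos (show ¬i = sa.length by omega), if_pos hlt,
            pvGo_eq_goC sa sb (i + 1) j _ (by omega) hj, List.tail_drop]
        congr 2
        simp [List.getD, List.getElem?_drop]
      · rw [dif_neg (show ¬¬i = sa.length by omega), if_neg hlt]
    · by_cases hlt : j < sb.length
      · rw [dif_pos (show ¬j = sb.length by omega), if_pos hlt,
            pvGo_eq_goC sa sb i (j + 1) _ hi (by omega), List.tail_drop]
        congr 2
        simp [List.getD, List.getElem?_drop]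
      · rw [dif_neg (show ¬¬j = sb.length by omega), if_neg hlt]
termination_by i j _ => (sa.length - i) + (sb.length - j)
decreasing_by all_goals omega

lemma pvSum_eq_goC : ∀ (n : Nat) (xs ys pre : List Char), n = xs.length + ys.length →
    ((pvAllBin n).map (fun m =>
      if m.count '0' = xs.length ∧ m.count '1' = ys.length then
        (if pvIsPrime (pvToInt (pre ++ pvMerge m xs ys)) then (1 : Int) else 0)
      else 0)).sum = pvGoC xs ys pre := by
  intro n
  induction n with
  | zero =>
    intro xs ys pre h
    have hx : xs = [] := List.eq_nil_of_length_eq_zero (by omega)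
    have hy : ys = [] := List.eq_nil_of_length_eq_zero (by omega)
    subst hx; subst hy
    rw [pvAllBin, pvGoC]
    simp [pvMerge]
  | succ n ih =>
    intro xs ys pre h
    rw [pvAllBin, List.map_append, List.sum_append, List.map_map]
    rw [pvGoC, if_neg (by rintro ⟨rfl, rfl⟩; simp at h)]
    congr 1
    · cases xs with
      | nil =>
        rw [dif_neg (by simp)]
        apply List.sum_eq_zero
        intro z hz
        obtain ⟨m, hm, rfl⟩ := List.mem_map.mp hz
        simp
      | cons x xs' =>
        rw [dif_pos (by simp)]
        have hrw : ∀ m : List Char, ((fun m =>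
            if m.count '0' = (x :: xs').length ∧ m.count '1' = ys.length then
              (if pvIsPrime (pvToInt (pre ++ pvMerge m (x :: xs') ys)) then (1 : Int) else 0)
            else 0) ∘ (fun m => '0' :: m)) m =
            (if m.count '0' = xs'.length ∧ m.count '1' = ys.length then
              (if pvIsPrime (pvToInt ((pre ++ [x]) ++ pvMerge m xs' ys)) then (1 : Int) else 0)
            else 0) := by
          intro m
          rw [← List.append_cons]
          simp [pvMerge]
        rw [List.map_congr_left (fun m _ => hrw m)]
        simp only [List.tail_cons, List.getD_cons_zero]
        exact ih xs' ys (pre ++ [x]) (by simp at h ⊢; omega)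
    · cases ys with
      | nil =>
        rw [dif_neg (by simp)]
        apply List.sum_eq_zero
        intro z hz
        obtain ⟨m, hm, rfl⟩ := List.mem_map.mp hz
        obtain ⟨m', hm', rfl⟩ := List.mem_map.mp hm
        simp
      | cons y ys' =>
        rw [List.map_map, dif_pos (by simp)]
        have hrw : ∀ m : List Char, ((fun m =>
            if m.count '0' = xs.length ∧ m.count '1' = (y :: ys').length then
              (if pvIsPrime (pvToInt (pre ++ pvMerge m xs (y :: ys'))) then (1 : Int) else 0)
            else 0) ∘ (fun m => '1' :: m)) m =
            (if m.count '0' = xs.length ∧ m.count '1' = ys'.length then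
              (if pvIsPrime (pvToInt ((pre ++ [y]) ++ pvMerge m xs ys')) then (1 : Int) else 0)
            else 0) := by
          intro m
          rw [← List.append_cons]
          simp [pvMerge]
        rw [List.map_congr_left (fun m _ => hrw m)]
        simp only [List.tail_cons, List.getD_cons_zero]
        exact ih xs ys' (pre ++ [y]) (by simp at h ⊢; omega)

-- ===== VERDICT (by name: the statement is the Claim_ definition above) =====
lemma pvMain (sa sb : List Char) :
    (pvMaskGen (sa.length + sb.length)).foldl (fun c mask =>
      if mask.count '0' = sa.length ∧ mask.count '1' = sb.length then
        (if pvIsPrime (pvToInt (pvBuild sa sb mask)) then c + 1 else c)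
      else c) 0 = pvGo sa sb 0 0 [] := by
  rw [pvMaskGen_eq]
  have hstep : (fun (c : Int) mask =>
      if mask.count '0' = sa.length ∧ mask.count '1' = sb.length then
        (if pvIsPrime (pvToInt (pvBuild sa sb mask)) then c + 1 else c)
      else c)
      = fun (c : Int) mask => c +
        (if mask.count '0' = sa.length ∧ mask.count '1' = sb.length then
          (if pvIsPrime (pvToInt ([] ++ pvMerge mask sa sb)) then (1 : Int) else 0)
        else 0) := by
    funext c m
    rw [pvBuild, pvBuild_fold_eq sa sb m [] 0 0]
    simp only [List.drop_zero]
    split_ifs <;> omega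
  rw [hstep, PySem.List.foldl_add, zero_add,
      pvSum_eq_goC (sa.length + sb.length) sa sb [] rfl,
      pvGo_eq_goC sa sb 0 0 [] (by omega) (by omega)]
  simp

theorem zad14_spec : Claim_equal_zad14 := by
  unfold Claim_equal_zad14
  intro a b _ _
  unfold Spec_zad14
  simp only [zad14, zad14_alt]
  exact pvMain _ _
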